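-- pv_equiv track=rewrite | github.com/Carlos-Jr/thermalbits | thermalbits/verilog_utils.py | compute_cone_for_gate
-- ===== SOURCE A (Python) =====
-- from collections.abc import Iterable, Sequence
--
-- def compute_cone_for_gate(
--     gate_output: str,
--     inputs: Sequence[str],
--     drivers: dict[str, list[str]],
-- ) -> list[str]:
--     cone_set = set()
--     visited = set()
--     stack = [gate_output]
--     input_set = set(inputs)
--
--     while stack:
--         signal = stack.pop()
--         if signal in visited:
--             continue
--         visited.add(signal)
--
--         if signal in input_set:
--             cone_set.add(signal)
--             continue
--
--         if signal in drivers: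
--             stack.extend(drivers[signal])
--
--     return [inp for inp in inputs if inp in cone_set]
-- ===== SOURCE B (Python) =====
-- def compute_cone_for_gate(gate_output, inputs, drivers):
--     # Dense fixpoint iteration: repeatedly saturate the reachable-signal set
--     # (stopping expansion at primary inputs) instead of an explicit DFS stack.
--     input_set = set(inputs)
--     rounds = 1 + sum(len(ds) for ds in drivers.values())
--     reach = {gate_output}
--     for _ in range(rounds):
--         before = len(reach)
--         for s in list(reach):
--             if s not in input_set:
--                 for d in drivers.get(s, []):
--                     reach.add(d)
--         if len(reach) == before:
--             break
--     return [inp for inp in inputs if inp in reach]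
-- ===== Notes on version B (the rewrite author's own statement) =====
-- stated objective: alternative
-- what changed: Replaces A's explicit LIFO-stack DFS with a dense fixpoint iteration: a bounded round loop that repeatedly saturates the reachable-signal set (stopping at primary inputs) until it stops growing, then filters the inputs by membership.
import Mathlib
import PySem

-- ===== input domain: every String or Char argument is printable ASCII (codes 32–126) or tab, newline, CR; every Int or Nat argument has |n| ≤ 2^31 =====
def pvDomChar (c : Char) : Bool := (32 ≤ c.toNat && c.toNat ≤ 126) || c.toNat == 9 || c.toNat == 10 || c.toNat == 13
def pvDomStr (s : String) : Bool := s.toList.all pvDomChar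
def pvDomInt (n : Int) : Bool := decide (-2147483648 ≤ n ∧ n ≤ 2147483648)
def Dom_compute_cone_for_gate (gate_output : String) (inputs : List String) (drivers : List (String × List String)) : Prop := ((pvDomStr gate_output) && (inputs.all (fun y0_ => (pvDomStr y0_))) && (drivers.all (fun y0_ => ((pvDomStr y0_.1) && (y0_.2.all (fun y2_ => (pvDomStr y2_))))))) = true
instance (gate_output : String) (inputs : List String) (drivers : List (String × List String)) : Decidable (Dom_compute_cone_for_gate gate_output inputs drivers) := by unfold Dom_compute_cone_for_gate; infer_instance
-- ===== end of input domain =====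

-- B replaces A's explicit LIFO-stack DFS by a bounded-round fixpoint saturation of the
-- reachable-signal set (objective: alternative decomposition, same results).

-- ===== PORT A =====
-- drivers.get(signal, []) under the first-match association-list convention
-- (A's "if signal in drivers: stack.extend(drivers[signal])" extends by exactly this list).
def pvChildren (drivers : List (String × List String)) (s : String) : List String :=
  ((PySem.Dict.mk drivers).get? s).getD []

-- all signals a stack/reach set can ever contain: the start gate plus every driver entry
def pvUniv (gate : String) (drivers : List (String × List String)) : List String :=
  gate :: drivers.flatMap (fun p => p.2)

theorem pvChildren_sub_univ (drivers : List (String × List String)) (gate s x : String)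
    (hx : x ∈ pvChildren drivers s) : x ∈ pvUniv gate drivers := by
  apply List.mem_cons_of_mem
  induction drivers with
  | nil => simp [pvChildren, PySem.Dict.get?] at hx
  | cons p rest ih =>
    obtain ⟨k, v⟩ := p
    rw [pvChildren, PySem.Dict.get?_mk_cons] at hx
    by_cases hk : (k == s) = true
    · simp [hk] at hx
      exact List.mem_flatMap.2 ⟨(k, v), List.mem_cons_self .., hx⟩
    · simp only [hk] at hx
      have := ih hx
      simp only [List.flatMap_cons]
      exact List.mem_append_right _ this

theorem pvFilter_length_lt {α : Type} {p q : α → Bool} (h : ∀ x, p x = true → q x = true)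
    {s : α} {U : List α} (hsU : s ∈ U) (hps : p s = false) (hqs : q s = true) :
    (U.filter p).length < (U.filter q).length := by
  induction U with
  | nil => cases hsU
  | cons a t ih =>
    have hmono : ∀ (l : List α), (l.filter p).length ≤ (l.filter q).length := by
      intro l
      rw [← List.countP_eq_length_filter, ← List.countP_eq_length_filter]
      exact List.countP_mono_left (fun x _ hx => h x hx)
    rcases List.mem_cons.1 hsU with rfl | hst
    · simp only [List.filter_cons, hps, hqs, if_true, List.length_cons]
      exact Nat.lt_succ_of_le (hmono t)
    · have hlt := ih hst
      simp only [List.filter_cons]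
      by_cases hpa : p a = true
      · simp [hpa, h a hpa]; omega
      · simp only [Bool.not_eq_true] at hpa
        simp only [hpa]
        by_cases hqa : q a = true
        · simp [hqa]; omega
        · simp only [Bool.not_eq_true] at hqa
          simp [hqa]; omega

theorem pvContains_false_iff (s : PySem.Set String) (x : String) :
    PySem.Set.contains s x = false ↔ x ∉ s := by
  constructor
  · intro h hm
    rw [(PySem.Set.contains_iff s x).2 hm] at h
    cases h
  · intro h
    cases hc : PySem.Set.contains s x
    · rfl
    · exact absurd ((PySem.Set.contains_iff s x).1 hc) h

theorem pvFilter_dec {s : String} (U : List String) (visited : PySem.Set String)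
    (hU : s ∈ U) (hs : ¬ PySem.Set.contains visited s = true) :
    (U.filter (fun x => !PySem.Set.contains (PySem.Set.add visited s) x)).length
      < (U.filter (fun x => !PySem.Set.contains visited x)).length := by
  have hsf : PySem.Set.contains visited s = false := Bool.eq_false_iff.2 hs
  apply pvFilter_length_lt (s := s) (hsU := hU)
  · intro x hx
    rw [Bool.not_eq_true'] at hx ⊢
    rw [pvContains_false_iff] at hx ⊢
    intro hm
    exact hx ((PySem.Set.mem_add visited s x).2 (Or.inl hm))
  · rw [Bool.not_eq_false']
    exact (PySem.Set.contains_iff _ _).2 ((PySem.Set.mem_add visited s s).2 (Or.inr rfl))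
  · rw [Bool.not_eq_true']
    exact hsf

-- A's while loop: stack top at the list head (stack.extend pushes drivers[s] so that the
-- LAST element is popped first, hence the .reverse ++).  The invariant argument hstack
-- (every stack element is in pvUniv) only serves termination.
def pvLoopA (inputSet : PySem.Set String) (drivers : List (String × List String)) (gate : String)
    (cone visited : PySem.Set String) (stack : List String)
    (hstack : ∀ x ∈ stack, x ∈ pvUniv gate drivers) : PySem.Set String :=
  match stack with
  | [] => cone
  | s :: rest =>
    if hv : PySem.Set.contains visited s = true then
      pvLoopA inputSet drivers gate cone visited rest
        (fun x hx => hstack x (List.mem_cons_of_mem s hx))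
    else if PySem.Set.contains inputSet s = true then
      pvLoopA inputSet drivers gate (PySem.Set.add cone s) (PySem.Set.add visited s) rest
        (fun x hx => hstack x (List.mem_cons_of_mem s hx))
    else
      pvLoopA inputSet drivers gate cone (PySem.Set.add visited s)
        ((pvChildren drivers s).reverse ++ rest)
        (fun x hx => by
          rcases List.mem_append.1 hx with h | h
          · exact pvChildren_sub_univ drivers gate s x (List.mem_reverse.1 h)
          · exact hstack x (List.mem_cons_of_mem s h))
termination_by (((pvUniv gate drivers).filter (fun x => !PySem.Set.contains visited x)).length, stack.length)
decreasing_by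
  · apply Prod.Lex.right
    simp
  · apply Prod.Lex.left
    exact pvFilter_dec _ _ (hstack s (List.mem_cons_self ..)) hv
  · apply Prod.Lex.left
    exact pvFilter_dec _ _ (hstack s (List.mem_cons_self ..)) hv

def compute_cone_for_gate (gate_output : String) (inputs : List String) (drivers : List (String × List String)) : List String :=
  let inputSet := PySem.Set.ofList inputs
  let cone := pvLoopA inputSet drivers gate_output PySem.Set.empty PySem.Set.empty [gate_output]
    (fun x hx => by rcases List.mem_singleton.1 hx with rfl; exact List.mem_cons_self ..)
  inputs.filter (fun i => PySem.Set.contains cone i)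

-- ===== PORT B =====
-- one saturation round: for s in list(reach): if s not in input_set: for d in drivers.get(s, []): reach.add(d)
def pvStepB (inputSet : PySem.Set String) (drivers : List (String × List String))
    (vis : PySem.Set String) : PySem.Set String :=
  List.foldl
    (fun acc s =>
      if PySem.Set.contains inputSet s = true then acc
      else List.foldl (fun a d => PySem.Set.add a d) acc (pvChildren drivers s))
    vis vis

-- the round loop: at most n rounds, stopping early when a round adds nothing (the break)
def pvIterB (inputSet : PySem.Set String) (drivers : List (String × List String)) :
    Nat → PySem.Set String → PySem.Set String
  | 0, vis => vis
  | Nat.succ n, vis =>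
    let vis' := pvStepB inputSet drivers vis
    if vis'.length = vis.length then vis'
    else pvIterB inputSet drivers n vis'

def compute_cone_for_gate_alt (gate_output : String) (inputs : List String) (drivers : List (String × List String)) : List String :=
  let inputSet := PySem.Set.ofList inputs
  let rounds := 1 + (drivers.map (fun p => p.2.length)).sum
  let reach := pvIterB inputSet drivers rounds (PySem.Set.add PySem.Set.empty gate_output)
  inputs.filter (fun i => PySem.Set.contains reach i)

-- ===== PRECONDITION & SPEC =====
def Spec_compute_cone_for_gate (gate_output : String) (inputs : List String) (drivers : List (String × List String)) (out : List String) : Prop := out = compute_cone_for_gate_alt gate_output inputs drivers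
instance (gate_output : String) (inputs : List String) (drivers : List (String × List String)) (out : List String) : Decidable (Spec_compute_cone_for_gate gate_output inputs drivers out) := by unfold Spec_compute_cone_for_gate; infer_instance

-- ===== CLAIM (what is proved, stated in full; the proofs are below) =====
def Claim_equal_compute_cone_for_gate : Prop := ∀ (gate_output : String) (inputs : List String) (drivers : List (String × List String)), Dom_compute_cone_for_gate gate_output inputs drivers → Spec_compute_cone_for_gate gate_output inputs drivers (compute_cone_for_gate gate_output inputs drivers)

-- ===== LEMMAS AND PROOFS =====

-- the cone relation both programs compute: reachable from gate, expansion stopping at inputs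
inductive pvReach (inputSet : PySem.Set String) (drivers : List (String × List String))
    (gate : String) : String → Prop where
  | base : pvReach inputSet drivers gate gate
  | step (s d : String) : pvReach inputSet drivers gate s →
      PySem.Set.contains inputSet s = false → d ∈ pvChildren drivers s →
      pvReach inputSet drivers gate d

theorem pvLoopA_mem (inputSet : PySem.Set String) (drivers : List (String × List String))
    (gate : String) (cone visited : PySem.Set String) (stack : List String)
    (hstack : ∀ x ∈ stack, x ∈ pvUniv gate drivers) :
    (∀ y ∈ visited, pvReach inputSet drivers gate y) →
    (∀ y ∈ stack, pvReach inputSet drivers gate y) →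
    (∀ y ∈ visited, PySem.Set.contains inputSet y = false →
        ∀ d ∈ pvChildren drivers y, d ∈ visited ∨ d ∈ stack) →
    (gate ∈ visited ∨ gate ∈ stack) →
    (∀ y, y ∈ cone ↔ y ∈ visited ∧ PySem.Set.contains inputSet y = true) →
    ∀ x, (x ∈ pvLoopA inputSet drivers gate cone visited stack hstack ↔
          pvReach inputSet drivers gate x ∧ PySem.Set.contains inputSet x = true) := by
  fun_induction pvLoopA inputSet drivers gate cone visited stack hstack with
  | case1 cone visited h1 h2 =>
    intro hvisR _ hclosed hgate hcone x
    have hvisAll : ∀ y, pvReach inputSet drivers gate y → y ∈ visited := by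
      intro y hy
      induction hy with
      | base =>
        rcases hgate with h | h
        · exact h
        · cases h
      | step s d hs hinp hd ih =>
        rcases hclosed s ih hinp d hd with h | h
        · exact h
        · cases h
    constructor
    · intro hx
      obtain ⟨hv, hi⟩ := (hcone x).1 hx
      exact ⟨hvisR x hv, hi⟩
    · intro ⟨hr, hi⟩
      exact (hcone x).2 ⟨hvisAll x hr, hi⟩
  | case2 cone visited s rest hstk1 hv hstk2 ih =>
    intro hvisR hstkR hcl hg hcone
    apply ih hvisR (fun y hy => hstkR y (List.mem_cons_of_mem s hy))
    · intro y hy hyi d hd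
      rcases hcl y hy hyi d hd with h | h
      · exact Or.inl h
      · rcases List.mem_cons.1 h with rfl | h
        · exact Or.inl ((PySem.Set.contains_iff _ _).1 hv)
        · exact Or.inr h
    · rcases hg with h | h
      · exact Or.inl h
      · rcases List.mem_cons.1 h with rfl | h
        · exact Or.inl ((PySem.Set.contains_iff _ _).1 hv)
        · exact Or.inr h
    · exact hcone
  | case3 cone visited s rest hstk1 hnv hin hstk2 ih =>
    intro hvisR hstkR hcl hg hcone
    apply ih
    · intro y hy
      rcases (PySem.Set.mem_add visited s y).1 hy with h | rfl
      · exact hvisR y h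
      · exact hstkR y (List.mem_cons_self ..)
    · exact fun y hy => hstkR y (List.mem_cons_of_mem s hy)
    · intro y hy hyi d hd
      rcases (PySem.Set.mem_add visited s y).1 hy with h | rfl
      · rcases hcl y h hyi d hd with h2 | h2
        · exact Or.inl ((PySem.Set.mem_add visited s d).2 (Or.inl h2))
        · rcases List.mem_cons.1 h2 with rfl | h2
          · exact Or.inl ((PySem.Set.mem_add visited d d).2 (Or.inr rfl))
          · exact Or.inr h2
      · rw [hyi] at hin; cases hin
    · rcases hg with h | h
      · exact Or.inl ((PySem.Set.mem_add visited s gate).2 (Or.inl h))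
      · rcases List.mem_cons.1 h with rfl | h
        · exact Or.inl ((PySem.Set.mem_add visited gate gate).2 (Or.inr rfl))
        · exact Or.inr h
    · intro y
      constructor
      · intro hc
        rcases (PySem.Set.mem_add cone s y).1 hc with hc | rfl
        · obtain ⟨h1, h2⟩ := (hcone y).1 hc
          exact ⟨(PySem.Set.mem_add visited s y).2 (Or.inl h1), h2⟩
        · exact ⟨(PySem.Set.mem_add visited y y).2 (Or.inr rfl), hin⟩
      · rintro ⟨h1, h2⟩
        rcases (PySem.Set.mem_add visited s y).1 h1 with h1 | rfl
        · exact (PySem.Set.mem_add cone s y).2 (Or.inl ((hcone y).2 ⟨h1, h2⟩))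
        · exact (PySem.Set.mem_add cone y y).2 (Or.inr rfl)
  | case4 cone visited s rest hstk1 hnv hin hstk2 ih =>
    intro hvisR hstkR hcl hg hcone
    have hins : PySem.Set.contains inputSet s = false := Bool.eq_false_iff.2 hin
    have hRs : pvReach inputSet drivers gate s := hstkR s (List.mem_cons_self ..)
    apply ih
    · intro y hy
      rcases (PySem.Set.mem_add visited s y).1 hy with h | rfl
      · exact hvisR y h
      · exact hRs
    · intro y hy
      rcases List.mem_append.1 hy with h | h
      · exact pvReach.step s y hRs hins (List.mem_reverse.1 h)
      · exact hstkR y (List.mem_cons_of_mem s h)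
    · intro y hy hyi d hd
      rcases (PySem.Set.mem_add visited s y).1 hy with h | rfl
      · rcases hcl y h hyi d hd with h2 | h2
        · exact Or.inl ((PySem.Set.mem_add visited s d).2 (Or.inl h2))
        · rcases List.mem_cons.1 h2 with rfl | h2
          · exact Or.inl ((PySem.Set.mem_add visited d d).2 (Or.inr rfl))
          · exact Or.inr (List.mem_append.2 (Or.inr h2))
      · exact Or.inr (List.mem_append.2 (Or.inl (List.mem_reverse.2 hd)))
    · rcases hg with h | h
      · exact Or.inl ((PySem.Set.mem_add visited s gate).2 (Or.inl h))
      · rcases List.mem_cons.1 h with rfl | h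
        · exact Or.inl ((PySem.Set.mem_add visited gate gate).2 (Or.inr rfl))
        · exact Or.inr (List.mem_append.2 (Or.inr h))
    · intro y
      constructor
      · intro hc
        obtain ⟨h1, h2⟩ := (hcone y).1 hc
        exact ⟨(PySem.Set.mem_add visited s y).2 (Or.inl h1), h2⟩
      · rintro ⟨h1, h2⟩
        rcases (PySem.Set.mem_add visited s y).1 h1 with h1 | rfl
        · exact (hcone y).2 ⟨h1, h2⟩
        · rw [hins] at h2; cases h2

-- B-side foldl characterisations
theorem pvMem_foldl_add (l : List String) (acc : PySem.Set String) (x : String) :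
    x ∈ List.foldl (fun a d => PySem.Set.add a d) acc l ↔ x ∈ acc ∨ x ∈ l := by
  induction l generalizing acc with
  | nil => simp
  | cons a t ih =>
    simp only [List.foldl_cons, ih, PySem.Set.mem_add, List.mem_cons]
    tauto

theorem pvMem_foldl_stepB (inputSet : PySem.Set String) (drivers : List (String × List String))
    (l : List String) (acc : PySem.Set String) (x : String) :
    x ∈ List.foldl
        (fun acc s =>
          if PySem.Set.contains inputSet s = true then acc
          else List.foldl (fun a d => PySem.Set.add a d) acc (pvChildren drivers s)) acc l ↔
      x ∈ acc ∨ ∃ s ∈ l, PySem.Set.contains inputSet s = false ∧ x ∈ pvChildren drivers s := by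
  induction l generalizing acc with
  | nil => simp
  | cons a t ih =>
    simp only [List.foldl_cons]
    by_cases ha : PySem.Set.contains inputSet a = true
    · rw [if_pos ha, ih]
      constructor
      · rintro (h | ⟨s, hs, h1, h2⟩)
        · exact Or.inl h
        · exact Or.inr ⟨s, List.mem_cons_of_mem a hs, h1, h2⟩
      · rintro (h | ⟨s, hs, h1, h2⟩)
        · exact Or.inl h
        · rcases List.mem_cons.1 hs with rfl | hs
          · rw [ha] at h1; cases h1
          · exact Or.inr ⟨s, hs, h1, h2⟩
    · have ha' : PySem.Set.contains inputSet a = false := Bool.eq_false_iff.2 ha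
      rw [if_neg ha, ih]
      constructor
      · rintro (h | ⟨s, hs, h1, h2⟩)
        · rcases (pvMem_foldl_add _ _ _).1 h with h | h
          · exact Or.inl h
          · exact Or.inr ⟨a, List.mem_cons_self .., ha', h⟩
        · exact Or.inr ⟨s, List.mem_cons_of_mem a hs, h1, h2⟩
      · rintro (h | ⟨s, hs, h1, h2⟩)
        · exact Or.inl ((pvMem_foldl_add _ _ _).2 (Or.inl h))
        · rcases List.mem_cons.1 hs with rfl | hs
          · exact Or.inl ((pvMem_foldl_add _ _ _).2 (Or.inr h2))
          · exact Or.inr ⟨s, hs, h1, h2⟩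

theorem pvMem_stepB (inputSet : PySem.Set String) (drivers : List (String × List String))
    (vis : PySem.Set String) (x : String) :
    x ∈ pvStepB inputSet drivers vis ↔
      x ∈ vis ∨ ∃ s ∈ vis, PySem.Set.contains inputSet s = false ∧ x ∈ pvChildren drivers s :=
  pvMem_foldl_stepB inputSet drivers vis vis x

theorem pvPrefix_foldl_add (l : List String) (acc : PySem.Set String) :
    acc <+: List.foldl (fun a d => PySem.Set.add a d) acc l := by
  induction l generalizing acc with
  | nil => exact List.prefix_refl _
  | cons a t ih =>
    refine List.IsPrefix.trans ?_ (ih (PySem.Set.add acc a))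
    rw [PySem.Set.add_eq_ite]
    split
    · exact List.prefix_refl _
    · exact List.prefix_append _ _

theorem pvPrefix_stepB (inputSet : PySem.Set String) (drivers : List (String × List String))
    (vis : PySem.Set String) : vis <+: pvStepB inputSet drivers vis := by
  suffices h : ∀ (l : List String) (acc : PySem.Set String),
      acc <+: List.foldl
        (fun acc s =>
          if PySem.Set.contains inputSet s = true then acc
          else List.foldl (fun a d => PySem.Set.add a d) acc (pvChildren drivers s)) acc l from
    h vis vis
  intro l
  induction l with
  | nil => exact fun acc => List.prefix_refl _
  | cons a t ih =>
    intro acc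
    simp only [List.foldl_cons]
    split
    · exact ih acc
    · exact List.IsPrefix.trans (pvPrefix_foldl_add _ acc) (ih _)

theorem pvNodup_foldl_add (l : List String) (acc : PySem.Set String) (h : acc.Nodup) :
    (List.foldl (fun a d => PySem.Set.add a d) acc l).Nodup := by
  induction l generalizing acc with
  | nil => exact h
  | cons a t ih => exact ih _ (PySem.Set.nodup_add acc a h)

theorem pvNodup_stepB (inputSet : PySem.Set String) (drivers : List (String × List String))
    (vis : PySem.Set String) (h : vis.Nodup) : (pvStepB inputSet drivers vis).Nodup := by
  suffices hh : ∀ (l : List String) (acc : PySem.Set String), acc.Nodup →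
      (List.foldl
        (fun acc s =>
          if PySem.Set.contains inputSet s = true then acc
          else List.foldl (fun a d => PySem.Set.add a d) acc (pvChildren drivers s)) acc l).Nodup from
    hh vis vis h
  intro l
  induction l with
  | nil => exact fun acc h => h
  | cons a t ih =>
    intro acc hacc
    simp only [List.foldl_cons]
    split
    · exact ih acc hacc
    · exact ih _ (pvNodup_foldl_add _ acc hacc)

theorem pvSubU_stepB (inputSet : PySem.Set String) (drivers : List (String × List String))
    (gate : String) (vis : PySem.Set String) (hv : ∀ y ∈ vis, y ∈ pvUniv gate drivers) :
    ∀ y ∈ pvStepB inputSet drivers vis, y ∈ pvUniv gate drivers := by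
  intro y hy
  rcases (pvMem_stepB inputSet drivers vis y).1 hy with h | ⟨s, _, _, hc⟩
  · exact hv y h
  · exact pvChildren_sub_univ drivers gate s y hc

theorem pvIterB_extensive (inputSet : PySem.Set String) (drivers : List (String × List String)) :
    ∀ (n : Nat) (vis : PySem.Set String) (x : String), x ∈ vis →
      x ∈ pvIterB inputSet drivers n vis := by
  intro n
  induction n with
  | zero => intro vis x hx; exact hx
  | succ n ih =>
    intro vis x hx
    simp only [pvIterB]
    split
    · exact (pvPrefix_stepB inputSet drivers vis).subset hx
    · exact ih _ x ((pvPrefix_stepB inputSet drivers vis).subset hx)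

theorem pvIterB_sound (inputSet : PySem.Set String) (drivers : List (String × List String))
    (gate : String) :
    ∀ (n : Nat) (vis : PySem.Set String), (∀ y ∈ vis, pvReach inputSet drivers gate y) →
      ∀ x ∈ pvIterB inputSet drivers n vis, pvReach inputSet drivers gate x := by
  intro n
  induction n with
  | zero => intro vis h x hx; exact h x hx
  | succ n ih =>
    intro vis h x hx
    have hstep : ∀ y ∈ pvStepB inputSet drivers vis, pvReach inputSet drivers gate y := by
      intro y hy
      rcases (pvMem_stepB inputSet drivers vis y).1 hy with h1 | ⟨s, hs, h1, h2⟩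
      · exact h y h1
      · exact pvReach.step s y (h s hs) h1 h2
    simp only [pvIterB] at hx
    split at hx
    · exact hstep x hx
    · exact ih _ hstep x hx

theorem pvIterB_closed (inputSet : PySem.Set String) (drivers : List (String × List String))
    (gate : String) :
    ∀ (n : Nat) (vis : PySem.Set String), vis.Nodup →
      (∀ y ∈ vis, y ∈ pvUniv gate drivers) →
      ((pvUniv gate drivers).dedup.length ≤ vis.length + n) →
      ∀ x, x ∈ pvStepB inputSet drivers (pvIterB inputSet drivers n vis) →
        x ∈ pvIterB inputSet drivers n vis := by
  intro n
  induction n with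
  | zero =>
    intro vis hnd hsub hcount x hx
    have hall : ∀ y ∈ pvUniv gate drivers, y ∈ vis := by
      intro y hy
      by_contra hny
      have hnd' : (y :: vis).Nodup := List.nodup_cons.2 ⟨hny, hnd⟩
      have hsub' : (y :: vis) ⊆ (pvUniv gate drivers).dedup := by
        intro z hz
        rcases List.mem_cons.1 hz with rfl | hz
        · exact List.mem_dedup.2 hy
        · exact List.mem_dedup.2 (hsub z hz)
      have := (hnd'.subperm hsub').length_le
      simp only [List.length_cons] at this
      omega
    exact hall x (pvSubU_stepB inputSet drivers gate vis hsub x hx)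
  | succ n ih =>
    simp only [pvIterB]
    intro vis hnd hsub hcount x
    by_cases hlen : (pvStepB inputSet drivers vis).length = vis.length
    · simp only [hlen, if_true]
      have heq : vis = pvStepB inputSet drivers vis :=
        (pvPrefix_stepB inputSet drivers vis).eq_of_length hlen.symm
      rw [← heq]
      rw [← heq]
      exact id
    · simp only [hlen, if_false]
      have hle := (pvPrefix_stepB inputSet drivers vis).length_le
      exact ih (pvStepB inputSet drivers vis)
        (pvNodup_stepB inputSet drivers vis hnd)
        (pvSubU_stepB inputSet drivers gate vis hsub)
        (by omega) x

theorem pvIterB_complete (inputSet : PySem.Set String) (drivers : List (String × List String))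
    (gate : String) (n : Nat) (vis : PySem.Set String) (hnd : vis.Nodup)
    (hsub : ∀ y ∈ vis, y ∈ pvUniv gate drivers)
    (hcount : (pvUniv gate drivers).dedup.length ≤ vis.length + n)
    (hg : gate ∈ vis) :
    ∀ x, pvReach inputSet drivers gate x → x ∈ pvIterB inputSet drivers n vis := by
  intro x hx
  induction hx with
  | base => exact pvIterB_extensive inputSet drivers n vis gate hg
  | step s d hs hinp hd ih =>
    apply pvIterB_closed inputSet drivers gate n vis hnd hsub hcount d
    exact (pvMem_stepB inputSet drivers _ d).2 (Or.inr ⟨s, ih, hinp, hd⟩)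

-- ===== VERDICT (by name: the statement is the Claim_ definition above) =====
theorem compute_cone_for_gate_spec : Claim_equal_compute_cone_for_gate := by
  intro gate inputs drivers _
  unfold Spec_compute_cone_for_gate compute_cone_for_gate compute_cone_for_gate_alt
  dsimp only
  apply List.filter_congr
  intro i hi
  rw [Bool.eq_iff_iff, PySem.Set.contains_iff, PySem.Set.contains_iff]
  have hiIS : PySem.Set.contains (PySem.Set.ofList inputs) i = true :=
    (PySem.Set.contains_iff _ _).2 ((PySem.Set.mem_ofList inputs i).2 hi)
  have hinv1 : ∀ y ∈ (PySem.Set.empty : PySem.Set String),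
      pvReach (PySem.Set.ofList inputs) drivers gate y := by intro y hy; cases hy
  have hinv2 : ∀ y ∈ [gate], pvReach (PySem.Set.ofList inputs) drivers gate y := by
    intro y hy; rcases List.mem_singleton.1 hy with rfl; exact pvReach.base
  have hinv3 : ∀ y ∈ (PySem.Set.empty : PySem.Set String),
      PySem.Set.contains (PySem.Set.ofList inputs) y = false →
      ∀ d ∈ pvChildren drivers y, d ∈ (PySem.Set.empty : PySem.Set String) ∨ d ∈ [gate] := by
    intro y hy; cases hy
  have hinv4 : gate ∈ (PySem.Set.empty : PySem.Set String) ∨ gate ∈ [gate] :=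
    Or.inr (List.mem_singleton.2 rfl)
  have hinv5 : ∀ y, y ∈ (PySem.Set.empty : PySem.Set String) ↔
      y ∈ (PySem.Set.empty : PySem.Set String) ∧
        PySem.Set.contains (PySem.Set.ofList inputs) y = true := by
    intro y
    constructor
    · intro hy; cases hy
    · rintro ⟨hy, _⟩; cases hy
  have hsub1 : ∀ y ∈ [gate], y ∈ pvUniv gate drivers := by
    intro y hy; rcases List.mem_singleton.1 hy with rfl; exact List.mem_cons_self ..
  have hcount : (pvUniv gate drivers).dedup.length ≤
      ([gate] : List String).length + (1 + (drivers.map (fun p => p.2.length)).sum) := by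
    have h1 := (List.dedup_sublist (pvUniv gate drivers)).length_le
    have h2 : (pvUniv gate drivers).length = 1 + (drivers.map (fun p => p.2.length)).sum := by
      simp [pvUniv, List.length_flatMap]
      omega
    omega
  constructor
  · intro h
    have hr := ((pvLoopA_mem _ _ _ _ _ _ _ hinv1 hinv2 hinv3 hinv4 hinv5 i).1 h).1
    exact pvIterB_complete (PySem.Set.ofList inputs) drivers gate
      (1 + (drivers.map (fun p => p.2.length)).sum) [gate] (List.nodup_singleton _)
      hsub1 hcount (List.mem_singleton.2 rfl) i hr
  · intro h
    have hr : pvReach (PySem.Set.ofList inputs) drivers gate i :=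
      pvIterB_sound (PySem.Set.ofList inputs) drivers gate
        (1 + (drivers.map (fun p => p.2.length)).sum) [gate] hinv2 i h
    exact (pvLoopA_mem _ _ _ _ _ _ _ hinv1 hinv2 hinv3 hinv4 hinv5 i).2 ⟨hr, hiIS⟩
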